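-- pv_equiv track=rewrite | github.com/joshuarebo/legalizeme-v3 | app/services/advanced/legal_corpus_crawler.py | _determine_document_type
-- ===== SOURCE A (Python) =====
-- def _determine_document_type(content: str, url: str) -> str:
--     """Determine document type from content and URL"""
--     content_lower = content.lower()
--     url_lower = url.lower()
--
--     if 'constitution' in content_lower or 'constitution' in url_lower:
--         return 'constitution'
--     elif any(term in content_lower for term in ['judgment', 'ruling', 'court']) or 'judgment' in url_lower:
--         return 'judgment'
--     elif any(term in content_lower for term in ['act', 'statute']) or 'act' in url_lower:
--         return 'legislation'
--     elif 'gazette' in content_lower or 'gazette' in url_lower: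
--         return 'gazette'
--     elif 'bill' in url_lower:
--         return 'bill'
--     else:
--         return 'legal_document'
-- ===== SOURCE B (Python) =====
-- # Priority-minimum classifier: score every keyword match, return the label of
-- # the lowest matched priority (no ordered if/elif cascade, no early return).
--
-- _CONTENT_TERMS = {'constitution': 0, 'judgment': 1, 'ruling': 1, 'court': 1,
--                   'act': 2, 'statute': 2, 'gazette': 3}
-- _URL_TERMS = {'constitution': 0, 'judgment': 1, 'act': 2, 'gazette': 3, 'bill': 4}
-- _LABELS = ['constitution', 'judgment', 'legislation', 'gazette', 'bill', 'legal_document']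
--
--
-- def _determine_document_type(content: str, url: str) -> str:
--     """Determine document type from content and URL"""
--     content_lower = content.lower()
--     url_lower = url.lower()
--     best = 5
--     for term, prio in _CONTENT_TERMS.items():
--         if term in content_lower:
--             best = min(best, prio)
--     for term, prio in _URL_TERMS.items():
--         if term in url_lower:
--             best = min(best, prio)
--     return _LABELS[best]
-- ===== Notes on version B (the rewrite author's own statement) =====
-- stated objective: alternative
-- what changed: Replaced the ordered if/elif cascade (first match wins, early return) by a scoring pass: every keyword carries a numeric priority, all matches are evaluated with no early exit, and the label of the minimum matched priority is returned.
import Mathlib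
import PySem

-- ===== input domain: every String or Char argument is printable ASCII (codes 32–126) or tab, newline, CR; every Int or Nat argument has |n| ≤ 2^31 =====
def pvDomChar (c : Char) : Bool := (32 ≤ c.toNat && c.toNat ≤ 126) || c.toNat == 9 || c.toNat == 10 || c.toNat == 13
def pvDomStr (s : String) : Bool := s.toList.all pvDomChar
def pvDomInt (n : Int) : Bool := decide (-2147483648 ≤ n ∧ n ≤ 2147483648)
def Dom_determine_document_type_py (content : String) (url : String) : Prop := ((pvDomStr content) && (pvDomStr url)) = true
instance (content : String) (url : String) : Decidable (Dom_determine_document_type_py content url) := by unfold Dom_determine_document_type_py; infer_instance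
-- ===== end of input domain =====

-- B replaces A's first-match if/elif cascade by a priority-scoring pass: every keyword match is
-- evaluated (no early return) and the label of the minimum matched priority is returned; same cost.


-- ===== PORT A =====
def determine_document_type_py (content : String) (url : String) : String :=
  let content_lower := PySem.Str.lower content
  let url_lower := PySem.Str.lower url
  if PySem.Str.isIn "constitution" content_lower || PySem.Str.isIn "constitution" url_lower then
    "constitution"
  else if ["judgment", "ruling", "court"].any (fun term => PySem.Str.isIn term content_lower)
      || PySem.Str.isIn "judgment" url_lower then
    "judgment"
  else if ["act", "statute"].any (fun term => PySem.Str.isIn term content_lower)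
      || PySem.Str.isIn "act" url_lower then
    "legislation"
  else if PySem.Str.isIn "gazette" content_lower || PySem.Str.isIn "gazette" url_lower then
    "gazette"
  else if PySem.Str.isIn "bill" url_lower then
    "bill"
  else
    "legal_document"

-- ===== PORT B =====
-- keyword → priority tables (Python dicts iterated in insertion order) and the label list
def pvContentTerms : List (String × Nat) :=
  [("constitution", 0), ("judgment", 1), ("ruling", 1), ("court", 1),
   ("act", 2), ("statute", 2), ("gazette", 3)]
def pvUrlTerms : List (String × Nat) :=
  [("constitution", 0), ("judgment", 1), ("act", 2), ("gazette", 3), ("bill", 4)]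
def pvLabels : List String :=
  ["constitution", "judgment", "legislation", "gazette", "bill", "legal_document"]

-- the 'for term, prio in … : if term in hay: best = min(best, prio)' loop
def pvScore (hay : String) (best : Nat) : List (String × Nat) → Nat
  | [] => best
  | (term, prio) :: rest =>
      pvScore hay (if PySem.Str.isIn term hay then min best prio else best) rest

def determine_document_type_py_alt (content : String) (url : String) : String :=
  let content_lower := PySem.Str.lower content
  let url_lower := PySem.Str.lower url
  let best := pvScore url_lower (pvScore content_lower 5 pvContentTerms) pvUrlTerms
  pvLabels.getD best ""   -- _LABELS[best]; best ≤ 5 by construction, so the index is in range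

-- ===== PRECONDITION & SPEC =====
def Spec_determine_document_type_py (content : String) (url : String) (out : String) : Prop := out = determine_document_type_py_alt content url
instance (content : String) (url : String) (out : String) : Decidable (Spec_determine_document_type_py content url out) := by unfold Spec_determine_document_type_py; infer_instance

-- ===== CLAIM (what is proved, stated in full; the proofs are below) =====
def Claim_equal_determine_document_type_py : Prop := ∀ (content : String) (url : String), Dom_determine_document_type_py content url → Spec_determine_document_type_py content url (determine_document_type_py content url)

-- ===== LEMMAS AND PROOFS =====

-- ===== VERDICT (by name: the statement is the Claim_ definition above) =====
theorem determine_document_type_py_spec : Claim_equal_determine_document_type_py := by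
  intro content url _
  unfold Spec_determine_document_type_py determine_document_type_py determine_document_type_py_alt
  simp only [pvContentTerms, pvUrlTerms, pvLabels, pvScore, List.any_cons, List.any_nil,
    Bool.or_false]
  generalize PySem.Str.isIn "constitution" (PySem.Str.lower content) = c1
  generalize PySem.Str.isIn "judgment" (PySem.Str.lower content) = c2
  generalize PySem.Str.isIn "ruling" (PySem.Str.lower content) = c3
  generalize PySem.Str.isIn "court" (PySem.Str.lower content) = c4
  generalize PySem.Str.isIn "act" (PySem.Str.lower content) = c5
  generalize PySem.Str.isIn "statute" (PySem.Str.lower content) = c6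
  generalize PySem.Str.isIn "gazette" (PySem.Str.lower content) = c7
  generalize PySem.Str.isIn "constitution" (PySem.Str.lower url) = u1
  generalize PySem.Str.isIn "judgment" (PySem.Str.lower url) = u2
  generalize PySem.Str.isIn "act" (PySem.Str.lower url) = u3
  generalize PySem.Str.isIn "gazette" (PySem.Str.lower url) = u4
  generalize PySem.Str.isIn "bill" (PySem.Str.lower url) = u5
  revert c1 c2 c3 c4 c5 c6 c7 u1 u2 u3 u4 u5
  decide
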